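-- pv_equiv track=rewrite | github.com/ragheeda-boop/ai-sales-os | archive/temp_scripts/sync_contacts.py | map_sequence_status
-- ===== SOURCE A (Python) =====
-- from typing import Dict, List, Optional, Set, Tuple
--
-- def map_sequence_status(contact_campaign_statuses: List[Dict]) -> str:
--     """Map campaign statuses to sequence status."""
--     if not contact_campaign_statuses:
--         return "Not Started"
--
--     statuses = {campaign.get("status", "").lower() for campaign in contact_campaign_statuses}
--
--     if "active" in statuses:
--         return "Active"
--     elif "finished" in statuses:
--         return "Completed"
--     elif "paused" in statuses:
--         return "Paused"
--     else:
--         return "Not Started"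
-- ===== SOURCE B (Python) =====
-- def map_sequence_status(contact_campaign_statuses):
--     """Map campaign statuses to sequence status (single-pass running maximum of a rank)."""
--     rank = {"active": 3, "finished": 2, "paused": 1}
--     best = 0
--     for campaign in contact_campaign_statuses:
--         best = max(best, rank.get(campaign.get("status", "").lower(), 0))
--     return {3: "Active", 2: "Completed", 1: "Paused", 0: "Not Started"}[best]
-- ===== Notes on version B (the rewrite author's own statement) =====
-- stated objective: simpler
-- what changed: Replaces the set build plus sequential membership tests (and the empty-list early return) with a single fold keeping the maximum status rank, decoded to the result string at the end.
import Mathlib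
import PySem

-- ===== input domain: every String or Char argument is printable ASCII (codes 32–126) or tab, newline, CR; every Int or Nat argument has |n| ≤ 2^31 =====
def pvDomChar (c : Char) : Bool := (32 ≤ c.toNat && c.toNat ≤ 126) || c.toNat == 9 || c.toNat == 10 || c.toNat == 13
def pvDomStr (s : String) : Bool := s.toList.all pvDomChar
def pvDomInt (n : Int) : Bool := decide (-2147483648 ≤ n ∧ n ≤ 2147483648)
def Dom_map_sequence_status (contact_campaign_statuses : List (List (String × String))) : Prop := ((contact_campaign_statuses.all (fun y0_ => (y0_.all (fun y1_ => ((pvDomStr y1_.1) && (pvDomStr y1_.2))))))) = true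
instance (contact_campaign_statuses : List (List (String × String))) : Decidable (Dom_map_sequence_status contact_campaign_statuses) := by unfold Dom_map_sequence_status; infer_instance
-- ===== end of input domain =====

-- B replaces A's set build + sequential membership tests (and the empty-list early return)
-- with a single fold over a running maximum status rank, decoded to a string at the end ("simpler").

-- ===== PORT A =====
def map_sequence_status (contact_campaign_statuses : List (List (String × String))) : String :=
  if contact_campaign_statuses = [] then "Not Started"
  else
    let statuses : PySem.Set String :=
      PySem.Set.ofList (contact_campaign_statuses.map
        (fun campaign => PySem.Str.lower ((PySem.Dict.mk campaign).getD "status" "")))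
    if PySem.Set.contains statuses "active" then "Active"
    else if PySem.Set.contains statuses "finished" then "Completed"
    else if PySem.Set.contains statuses "paused" then "Paused"
    else "Not Started"

-- ===== PORT B =====
-- Source B's literal rank / decode dicts
def pvRankTable : PySem.Dict String Nat := PySem.Dict.mk [("active", 3), ("finished", 2), ("paused", 1)]
def pvDecodeTable : PySem.Dict Nat String := PySem.Dict.mk [(3, "Active"), (2, "Completed"), (1, "Paused"), (0, "Not Started")]

def map_sequence_status_alt (contact_campaign_statuses : List (List (String × String))) : String :=
  let best := contact_campaign_statuses.foldl
    (fun best campaign =>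
      max best (pvRankTable.getD (PySem.Str.lower ((PySem.Dict.mk campaign).getD "status" "")) 0))
    0
  pvDecodeTable.getD best "Not Started"

-- ===== PRECONDITION & SPEC =====
def Spec_map_sequence_status (contact_campaign_statuses : List (List (String × String))) (out : String) : Prop := out = map_sequence_status_alt contact_campaign_statuses
instance (contact_campaign_statuses : List (List (String × String))) (out : String) : Decidable (Spec_map_sequence_status contact_campaign_statuses out) := by unfold Spec_map_sequence_status; infer_instance

-- ===== CLAIM (what is proved, stated in full; the proofs are below) =====
def Claim_equal_map_sequence_status : Prop := ∀ (contact_campaign_statuses : List (List (String × String))), Dom_map_sequence_status contact_campaign_statuses → Spec_map_sequence_status contact_campaign_statuses (map_sequence_status contact_campaign_statuses)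

-- ===== LEMMAS AND PROOFS =====

-- the lowercased status of one campaign, and its rank as B computes it
def pvStatusOf (campaign : List (String × String)) : String :=
  PySem.Str.lower ((PySem.Dict.mk campaign).getD "status" "")

def pvRankOf (campaign : List (String × String)) : Nat :=
  pvRankTable.getD (pvStatusOf campaign) 0

lemma pvRankTable_getD (s : String) :
    pvRankTable.getD s 0 =
      (if s = "active" then 3 else if s = "finished" then 2 else if s = "paused" then 1 else 0) := by
  by_cases h1 : s = "active"
  · subst h1; decide
  by_cases h2 : s = "finished"
  · subst h2; decide
  by_cases h3 : s = "paused"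
  · subst h3; decide
  simp [pvRankTable, PySem.Dict.getD_eq_get?_getD, PySem.Dict.get?, h1, h2, h3,
    Ne.symm h1, Ne.symm h2, Ne.symm h3]

lemma pvRankOf_le (c : List (String × String)) : pvRankOf c ≤ 3 := by
  unfold pvRankOf
  rw [pvRankTable_getD]
  split_ifs <;> omega

lemma pvRankOf_eq_iff (c : List (String × String)) (k : Nat) (s : String) (hk : k ∈ [1,2,3])
    (hs : pvRankTable.getD s 0 = k) :
    (k ≤ pvRankOf c ∧ pvRankOf c ≤ k) ↔ pvStatusOf c = s := by
  unfold pvRankOf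
  rw [pvRankTable_getD] at hs ⊢
  fin_cases hk <;> split_ifs at hs ⊢ <;> simp_all

lemma pv_le_fold (l : List (List (String × String))) (b k : ℕ) :
    k ≤ l.foldl (fun a c => max a (pvRankOf c)) b ↔ k ≤ b ∨ ∃ c ∈ l, k ≤ pvRankOf c := by
  induction l generalizing b with
  | nil => simp
  | cons c cs ih =>
    simp only [List.foldl_cons, ih, le_max_iff, List.mem_cons]
    constructor
    · rintro (((h | h) | ⟨d, hd, hdk⟩))
      · exact Or.inl h
      · exact Or.inr ⟨c, Or.inl rfl, h⟩
      · exact Or.inr ⟨d, Or.inr hd, hdk⟩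
    · rintro (h | ⟨d, (rfl | hd), hdk⟩)
      · exact Or.inl (Or.inl h)
      · exact Or.inl (Or.inr hdk)
      · exact Or.inr ⟨d, hd, hdk⟩

lemma pv_fold_le (l : List (List (String × String))) (b : ℕ) (hb : b ≤ 3) :
    l.foldl (fun a c => max a (pvRankOf c)) b ≤ 3 := by
  induction l generalizing b with
  | nil => simpa
  | cons c cs ih => exact ih _ (max_le hb (pvRankOf_le c))

lemma pv_alt_eq (l : List (List (String × String))) :
    map_sequence_status_alt l =
      pvDecodeTable.getD (l.foldl (fun a c => max a (pvRankOf c)) 0) "Not Started" := rfl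

theorem pv_main (l : List (List (String × String))) :
    map_sequence_status l = map_sequence_status_alt l := by
  rw [pv_alt_eq]
  unfold map_sequence_status
  rcases eq_or_ne l [] with rfl | hne
  · decide
  · simp only [hne, if_false]
    simp only [show (fun campaign => PySem.Str.lower ((PySem.Dict.mk campaign).getD "status" "")) = pvStatusOf from rfl]
    set M := l.foldl (fun a c => max a (pvRankOf c)) 0 with hM
    have hM3 : M ≤ 3 := pv_fold_le l 0 (by omega)
    -- 'status s in the set' ↔ 'some campaign has rank exactly k'
    have key : ∀ k s, k ∈ ([1,2,3] : List ℕ) → pvRankTable.getD s 0 = k →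
        ((PySem.Set.contains (PySem.Set.ofList (l.map pvStatusOf)) s) = true
          ↔ ∃ c ∈ l, k ≤ pvRankOf c ∧ pvRankOf c ≤ k) := by
      intro k s hk hs
      rw [PySem.Set.contains_iff, PySem.Set.mem_ofList]
      simp only [List.mem_map]
      constructor
      · rintro ⟨c, hc, hcs⟩
        exact ⟨c, hc, (pvRankOf_eq_iff c k s hk hs).mpr hcs⟩
      · rintro ⟨c, hc, h⟩
        exact ⟨c, hc, (pvRankOf_eq_iff c k s hk hs).mp h⟩
    have kA := key 3 "active" (by simp) (by decide)
    have kF := key 2 "finished" (by simp) (by decide)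
    have kP := key 1 "paused" (by simp) (by decide)
    have hle : ∀ k, k ≤ M ↔ ∃ c ∈ l, k ≤ pvRankOf c ∨ k = 0 := by
      intro k
      rw [hM, pv_le_fold]
      rcases l with _ | ⟨c, cs⟩
      · exact absurd rfl hne
      constructor
      · rintro (h | ⟨d, hd, hdk⟩)
        · exact ⟨c, by simp, Or.inr (by omega)⟩
        · exact ⟨d, hd, Or.inl hdk⟩
      · rintro ⟨d, hd, (hdk | rfl)⟩
        · exact Or.inr ⟨d, hd, hdk⟩
        · exact Or.inl (by omega)
    have hle' : ∀ k, 1 ≤ k → (k ≤ M ↔ ∃ c ∈ l, k ≤ pvRankOf c) := by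
      intro k hk1
      rw [hle k]
      constructor
      · rintro ⟨d, hd, (h | rfl)⟩
        · exact ⟨d, hd, h⟩
        · omega
      · rintro ⟨d, hd, h⟩; exact ⟨d, hd, Or.inl h⟩
    interval_cases M
    · -- M = 0
      have h1 : ¬ ∃ c ∈ l, 1 ≤ pvRankOf c := by rw [← hle' 1 (by omega)]; omega
      have hn : ∀ k, 1 ≤ k → ¬ ∃ c ∈ l, k ≤ pvRankOf c ∧ pvRankOf c ≤ k := by
        rintro k hk ⟨c, hc, h, _⟩; exact h1 ⟨c, hc, by omega⟩
      rw [if_neg (by rw [kA]; exact fun h => hn 3 (by omega) (by simpa using h)),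
          if_neg (by rw [kF]; exact fun h => hn 2 (by omega) (by simpa using h)),
          if_neg (by rw [kP]; exact fun h => hn 1 (by omega) (by simpa using h))]
      decide
    · -- M = 1
      have h2 : ¬ ∃ c ∈ l, 2 ≤ pvRankOf c := by rw [← hle' 2 (by omega)]; omega
      have hP : ∃ c ∈ l, 1 ≤ pvRankOf c ∧ pvRankOf c ≤ 1 := by
        obtain ⟨c, hc, h⟩ := (hle' 1 (by omega)).mp (by omega)
        refine ⟨c, hc, h, ?_⟩
        by_contra hgt; exact h2 ⟨c, hc, by omega⟩
      rw [if_neg (by rw [kA]; rintro ⟨c, hc, h, _⟩; exact h2 ⟨c, hc, by omega⟩),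
          if_neg (by rw [kF]; rintro ⟨c, hc, h, _⟩; exact h2 ⟨c, hc, by omega⟩),
          if_pos (kP.mpr hP)]
      decide
    · -- M = 2
      have h3 : ¬ ∃ c ∈ l, 3 ≤ pvRankOf c := by rw [← hle' 3 (by omega)]; omega
      have hF : ∃ c ∈ l, 2 ≤ pvRankOf c ∧ pvRankOf c ≤ 2 := by
        obtain ⟨c, hc, h⟩ := (hle' 2 (by omega)).mp (by omega)
        refine ⟨c, hc, h, ?_⟩
        by_contra hgt; exact h3 ⟨c, hc, by omega⟩
      rw [if_neg (by rw [kA]; rintro ⟨c, hc, h, _⟩; exact h3 ⟨c, hc, by omega⟩),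
          if_pos (kF.mpr hF)]
      decide
    · -- M = 3
      have hA : ∃ c ∈ l, 3 ≤ pvRankOf c ∧ pvRankOf c ≤ 3 := by
        obtain ⟨c, hc, h⟩ := (hle' 3 (by omega)).mp (by omega)
        exact ⟨c, hc, h, pvRankOf_le c⟩
      rw [if_pos (kA.mpr hA)]
      decide

-- ===== VERDICT (by name: the statement is the Claim_ definition above) =====
theorem map_sequence_status_spec : Claim_equal_map_sequence_status := by
  intro l _
  unfold Spec_map_sequence_status
  exact pv_main l
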